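-- pv_equiv track=rewrite | github.com/hamza-roujdami/talent-reconnect-agent | tools/scoring.py | _skill_synonyms_match
-- ===== SOURCE A (Python) =====
-- def _skill_synonyms_match(skill1: str, skill2: str) -> bool:
--     """Check if two skills are synonyms."""
--     synonyms = [
--         {"python", "py"},
--         {"javascript", "js", "typescript", "ts"},
--         {"machine learning", "ml", "deep learning", "dl"},
--         {"artificial intelligence", "ai"},
--         {"amazon web services", "aws"},
--         {"google cloud platform", "gcp", "google cloud"},
--         {"microsoft azure", "azure"},
--         {"kubernetes", "k8s"},
--         {"docker", "containers", "containerization"},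
--         {"react", "reactjs", "react.js"},
--         {"node", "nodejs", "node.js"},
--         {"postgres", "postgresql"},
--         {"mongo", "mongodb"},
--     ]
--
--     for group in synonyms:
--         if skill1 in group and skill2 in group:
--             return True
--     return False
-- ===== SOURCE B (Python) =====
-- # Flat precomputed lookup table: every skill string -> id of its synonym group.
-- _GROUP_OF = {
--     "python": 0, "py": 0,
--     "javascript": 1, "js": 1, "typescript": 1, "ts": 1,
--     "machine learning": 2, "ml": 2, "deep learning": 2, "dl": 2,
--     "artificial intelligence": 3, "ai": 3,
--     "amazon web services": 4, "aws": 4,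
--     "google cloud platform": 5, "gcp": 5, "google cloud": 5,
--     "microsoft azure": 6, "azure": 6,
--     "kubernetes": 7, "k8s": 7,
--     "docker": 8, "containers": 8, "containerization": 8,
--     "react": 9, "reactjs": 9, "react.js": 9,
--     "node": 10, "nodejs": 10, "node.js": 10,
--     "postgres": 11, "postgresql": 11,
--     "mongo": 12, "mongodb": 12,
-- }
--
--
-- def _skill_synonyms_match(skill1: str, skill2: str) -> bool:
--     """Check if two skills are synonyms."""
--     g = _GROUP_OF.get(skill1, -1)
--     return g >= 0 and g == _GROUP_OF.get(skill2, -2)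
-- ===== Notes on version B (the rewrite author's own statement) =====
-- stated objective: simpler
-- what changed: Replaces A's per-call scan over a list of synonym sets with a flat precomputed skill-to-group-id table: a match is two table lookups (with distinct negative sentinels for misses) and one integer comparison, with no loop at call time.
import Mathlib
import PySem

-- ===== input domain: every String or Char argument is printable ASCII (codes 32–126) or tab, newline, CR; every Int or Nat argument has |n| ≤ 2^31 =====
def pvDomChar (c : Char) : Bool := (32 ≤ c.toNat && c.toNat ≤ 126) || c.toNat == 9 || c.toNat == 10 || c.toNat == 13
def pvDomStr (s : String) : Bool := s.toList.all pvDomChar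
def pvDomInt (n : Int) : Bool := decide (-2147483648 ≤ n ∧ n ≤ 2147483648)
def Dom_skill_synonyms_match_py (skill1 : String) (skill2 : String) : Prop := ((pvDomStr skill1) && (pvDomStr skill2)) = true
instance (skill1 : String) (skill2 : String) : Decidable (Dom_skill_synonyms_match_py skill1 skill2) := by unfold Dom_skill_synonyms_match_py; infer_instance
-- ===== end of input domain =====

-- B replaces A's per-call scan over a list of synonym sets with a flat
-- precomputed skill→group-id table: two lookups and one integer comparison.


-- ===== PORT A =====
-- A's literal list of synonym sets
def pvSynGroups : List (PySem.Set String) :=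
  [PySem.Set.ofList ["python","py"],
   PySem.Set.ofList ["javascript","js","typescript","ts"],
   PySem.Set.ofList ["machine learning","ml","deep learning","dl"],
   PySem.Set.ofList ["artificial intelligence","ai"],
   PySem.Set.ofList ["amazon web services","aws"],
   PySem.Set.ofList ["google cloud platform","gcp","google cloud"],
   PySem.Set.ofList ["microsoft azure","azure"],
   PySem.Set.ofList ["kubernetes","k8s"],
   PySem.Set.ofList ["docker","containers","containerization"],
   PySem.Set.ofList ["react","reactjs","react.js"],
   PySem.Set.ofList ["node","nodejs","node.js"],
   PySem.Set.ofList ["postgres","postgresql"],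
   PySem.Set.ofList ["mongo","mongodb"]]

-- A's 'for group in synonyms: if skill1 in group and skill2 in group: return True'
def pvLoopA : List (PySem.Set String) → String → String → Bool
  | [], _, _ => false
  | g :: rest, s1, s2 =>
    if PySem.Set.contains g s1 && PySem.Set.contains g s2 then true
    else pvLoopA rest s1 s2

def skill_synonyms_match_py (skill1 : String) (skill2 : String) : Bool :=
  pvLoopA pvSynGroups skill1 skill2

-- ===== PORT B =====
-- B's '_GROUP_OF' dict literal: a flat skill→group-id table (distinct keys)
def pvGroupOf : PySem.Dict String Int :=
  PySem.Dict.ofList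
    [("python",0),("py",0),
     ("javascript",1),("js",1),("typescript",1),("ts",1),
     ("machine learning",2),("ml",2),("deep learning",2),("dl",2),
     ("artificial intelligence",3),("ai",3),
     ("amazon web services",4),("aws",4),
     ("google cloud platform",5),("gcp",5),("google cloud",5),
     ("microsoft azure",6),("azure",6),
     ("kubernetes",7),("k8s",7),
     ("docker",8),("containers",8),("containerization",8),
     ("react",9),("reactjs",9),("react.js",9),
     ("node",10),("nodejs",10),("node.js",10),
     ("postgres",11),("postgresql",11),
     ("mongo",12),("mongodb",12)]

-- B's 'g = _GROUP_OF.get(skill1, -1); return g >= 0 and g == _GROUP_OF.get(skill2, -2)'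
def skill_synonyms_match_py_alt (skill1 : String) (skill2 : String) : Bool :=
  let g := PySem.Dict.getD pvGroupOf skill1 (-1)
  decide (0 ≤ g) && (g == PySem.Dict.getD pvGroupOf skill2 (-2))

-- ===== PRECONDITION & SPEC =====
def Spec_skill_synonyms_match_py (skill1 : String) (skill2 : String) (out : Bool) : Prop := out = skill_synonyms_match_py_alt skill1 skill2
instance (skill1 : String) (skill2 : String) (out : Bool) : Decidable (Spec_skill_synonyms_match_py skill1 skill2 out) := by unfold Spec_skill_synonyms_match_py; infer_instance

-- ===== CLAIM (what is proved, stated in full; the proofs are below) =====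
def Claim_equal_skill_synonyms_match_py : Prop := ∀ (skill1 : String) (skill2 : String), Dom_skill_synonyms_match_py skill1 skill2 → Spec_skill_synonyms_match_py skill1 skill2 (skill_synonyms_match_py skill1 skill2)

-- ===== LEMMAS AND PROOFS =====

-- proof-side view of the data: the groups as plain string lists
def pvGroupsP : List (List String) :=
  [["python","py"],["javascript","js","typescript","ts"],
   ["machine learning","ml","deep learning","dl"],
   ["artificial intelligence","ai"],["amazon web services","aws"],
   ["google cloud platform","gcp","google cloud"],["microsoft azure","azure"],
   ["kubernetes","k8s"],["docker","containers","containerization"],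
   ["react","reactjs","react.js"],["node","nodejs","node.js"],
   ["postgres","postgresql"],["mongo","mongodb"]]

-- index (counting from i) of the FIRST group containing s
def pvIdx? : List (List String) → Int → String → Option Int
  | [], _, _ => none
  | g :: rest, i, s => if s ∈ g then some i else pvIdx? rest (i + 1) s

-- the group list flattened into (skill, id) pairs, ids counting from i
def pvPairsOf : List (List String) → Int → List (String × Int)
  | [], _ => []
  | g :: rest, i => g.map (fun s => (s, i)) ++ pvPairsOf rest (i + 1)

lemma pvIdx?_none {gs : List (List String)} {s : String} (h : s ∉ gs.flatten) (i : Int) :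
    pvIdx? gs i s = none := by
  induction gs generalizing i with
  | nil => rfl
  | cons g rest ih =>
    simp only [List.flatten_cons, List.mem_append, not_or] at h
    simp [pvIdx?, h.1, ih h.2]

lemma pvIdx?_ge {gs : List (List String)} {s : String} {i j : Int}
    (h : pvIdx? gs i s = some j) : i ≤ j := by
  induction gs generalizing i j with
  | nil => simp [pvIdx?] at h
  | cons g rest ih =>
    rw [pvIdx?] at h
    split_ifs at h with hg
    · simp only [Option.some.injEq] at h; omega
    · have := ih h; omega

lemma contains_ofList (g : List String) (s : String) :
    PySem.Set.contains (PySem.Set.ofList g) s = decide (s ∈ g) := by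
  simp [PySem.Set.mem_ofList]

-- first-match lookup in a literal dict over the pairs of a group list = pvIdx?
lemma get?_mk_pairsOf (gs : List (List String)) (i : Int) (s : String) :
    (PySem.Dict.mk (pvPairsOf gs i)).get? s = pvIdx? gs i s := by
  induction gs generalizing i with
  | nil => simp [pvPairsOf, pvIdx?, PySem.Dict.get?]
  | cons g rest ih =>
    simp only [pvPairsOf, pvIdx?]
    induction g with
    | nil => simpa using ih (i + 1)
    | cons x g' ihg =>
      rw [List.map_cons, List.cons_append, PySem.Dict.get?_mk_cons]
      by_cases hx : s = x
      · simp [hx]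
      · have : (x == s) = false := by simp [Ne.symm hx]
        rw [this, if_neg]
        · simpa [List.mem_cons, hx] using ihg
        · simp

-- main invariant: on key-disjoint groups A's scan agrees with index comparison
lemma loopA_eq_idx (gs : List (List String)) (i : Int) (s1 s2 : String)
    (hnd : gs.flatten.Nodup) :
    pvLoopA (gs.map PySem.Set.ofList) s1 s2 =
    (match pvIdx? gs i s1, pvIdx? gs i s2 with
     | some j1, some j2 => j1 == j2
     | _, _ => false) := by
  induction gs generalizing i with
  | nil => rfl
  | cons g rest ih =>
    simp only [List.flatten_cons, List.nodup_append] at hnd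
    obtain ⟨hg, hrest, hdisj⟩ := hnd
    have hd : ∀ x ∈ g, x ∉ rest.flatten := fun x hx hx' => hdisj x hx x hx' rfl
    simp only [List.map_cons, pvLoopA, pvIdx?, contains_ofList]
    by_cases h1 : s1 ∈ g <;> by_cases h2 : s2 ∈ g
    · simp [h1, h2]
    · -- s1 in g, s2 not: guard false; s1 occurs in no later group
      rw [if_neg (by simp [h2]), if_pos h1, if_neg h2, ih (i + 1) hrest,
        pvIdx?_none (hd s1 h1)]
      rcases hr2 : pvIdx? rest (i + 1) s2 with _ | j
      · rfl
      · have := pvIdx?_ge hr2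
        simp; omega
    · rw [if_neg (by simp [h1]), if_neg h1, if_pos h2, ih (i + 1) hrest,
        pvIdx?_none (hd s2 h2)]
      rcases hr1 : pvIdx? rest (i + 1) s1 with _ | j
      · rfl
      · have := pvIdx?_ge hr1
        simp; omega
    · rw [if_neg (by simp [h1]), if_neg h1, if_neg h2, ih (i + 1) hrest]

set_option maxRecDepth 100000 in
lemma pvGroupsP_nodup : pvGroupsP.flatten.Nodup := by decide

-- B's literal table IS the pairs of the proof-side group list (both concrete)
set_option maxRecDepth 100000 in
lemma pvGroupOf_eq : pvGroupOf = PySem.Dict.mk (pvPairsOf pvGroupsP 0) := by decide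

-- A's set list IS the proof-side group list mapped through Set.ofList
lemma pvSynGroups_eq : pvSynGroups = pvGroupsP.map PySem.Set.ofList := rfl

-- ===== VERDICT (by name: the statement is the Claim_ definition above) =====
set_option maxRecDepth 100000 in
theorem skill_synonyms_match_py_spec : Claim_equal_skill_synonyms_match_py := by
  intro s1 s2 _
  unfold Spec_skill_synonyms_match_py skill_synonyms_match_py skill_synonyms_match_py_alt
  rw [pvSynGroups_eq, loopA_eq_idx pvGroupsP 0 s1 s2 pvGroupsP_nodup]
  simp only [pvGroupOf_eq, PySem.Dict.getD, get?_mk_pairsOf]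
  rcases hr1 : pvIdx? pvGroupsP 0 s1 with _ | j1 <;>
    rcases hr2 : pvIdx? pvGroupsP 0 s2 with _ | j2 <;>
    simp_all
  all_goals try omega
  all_goals (have h1 := pvIdx?_ge hr1; omega)
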